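-- pv_equiv track=rewrite | github.com/FAU-Inf2/LLWM | hashmark + xmark/Madata/xmark/Tools/runInGDB.py | deleteLeadingZeroes
-- ===== SOURCE A (Python) =====
-- def deleteLeadingZeroes(instring):
-- 	x=False
-- 	nmbrs=False
-- 	outstring=""
-- 	for c in instring:
-- 		if((not x) and (c=='x')):
-- 			x=True
-- 		elif(x and (not c=='0')):
-- 			nmbrs=True
-- 		if((not x) or nmbrs or c=='x'):
-- 			outstring=outstring+str(c)
--
-- 	return outstring
-- ===== SOURCE B (Python) =====
-- def deleteLeadingZeroes(instring):
-- 	i = instring.find('x')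
-- 	if i == -1:
-- 		return instring
-- 	return instring[:i+1] + instring[i+1:].lstrip('0')
-- ===== Notes on version B (the rewrite author's own statement) =====
-- stated objective: idiomatic
-- what changed: Replaces A's single stateful character loop with two boolean flags by a locate-then-slice strategy: find the index of the first marker character, keep the prefix through it, and strip the leading run of zero digits from the remainder.
import Mathlib
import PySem

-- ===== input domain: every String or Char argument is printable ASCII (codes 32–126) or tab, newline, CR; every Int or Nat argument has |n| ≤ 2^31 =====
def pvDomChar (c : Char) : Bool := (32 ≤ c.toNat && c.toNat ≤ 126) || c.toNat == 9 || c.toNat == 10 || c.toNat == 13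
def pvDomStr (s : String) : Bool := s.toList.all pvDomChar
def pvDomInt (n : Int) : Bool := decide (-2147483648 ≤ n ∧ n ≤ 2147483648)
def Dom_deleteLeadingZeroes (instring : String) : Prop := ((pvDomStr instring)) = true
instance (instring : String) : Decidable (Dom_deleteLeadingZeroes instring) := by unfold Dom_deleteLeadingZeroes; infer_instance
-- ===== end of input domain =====

-- ===== PORT A =====
-- B replaces A's stateful flag loop by a locate-then-slice strategy (find + lstrip) (objective: idiomatic).
def deleteLeadingZeroes (instring : String) : String :=
  -- literal port of A's loop: state (x, nmbrs, outstring)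
  let st := instring.toList.foldl (fun (st : Bool × Bool × List Char) c =>
    let x := st.1
    let nmbrs := st.2.1
    let out := st.2.2
    let p := if !x && (c == 'x') then (true, nmbrs)
             else if x && !(c == '0') then (x, true)
             else (x, nmbrs)
    let out := if !p.1 || p.2 || c == 'x' then out ++ [c] else out
    (p.1, p.2, out)) (false, false, [])
  String.ofList st.2.2

-- ===== PORT B =====
def deleteLeadingZeroes_alt (instring : String) : String :=
  let i := PySem.Str.find instring "x"
  if i == -1 then instring
  else
    -- instring[:i+1] + instring[i+1:].lstrip('0'); lstrip('0') is exactly dropWhile (== '0')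
    String.ofList (PySem.List.slice instring.toList none (some (i + 1)) ++
      (PySem.List.slice instring.toList (some (i + 1)) none).dropWhile (· == '0'))

-- ===== PRECONDITION & SPEC =====
def Spec_deleteLeadingZeroes (instring : String) (out : String) : Prop := out = deleteLeadingZeroes_alt instring
instance (instring : String) (out : String) : Decidable (Spec_deleteLeadingZeroes instring out) := by unfold Spec_deleteLeadingZeroes; infer_instance

-- ===== CLAIM (what is proved, stated in full; the proofs are below) =====
def Claim_equal_deleteLeadingZeroes : Prop := ∀ (instring : String), Dom_deleteLeadingZeroes instring → Spec_deleteLeadingZeroes instring (deleteLeadingZeroes instring)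

-- ===== LEMMAS AND PROOFS =====

-- abbreviate A's loop step
def pvStep (st : Bool × Bool × List Char) (c : Char) : Bool × Bool × List Char :=
  let x := st.1
  let nmbrs := st.2.1
  let out := st.2.2
  let p := if !x && (c == 'x') then (true, nmbrs)
           else if x && !(c == '0') then (x, true)
           else (x, nmbrs)
  let out := if !p.1 || p.2 || c == 'x' then out ++ [c] else out
  (p.1, p.2, out)

-- once x=true and nmbrs=true, everything is copied
theorem pvLoop_copy (l : List Char) (out : List Char) :
    l.foldl pvStep (true, true, out) = (true, true, out ++ l) := by
  induction l generalizing out with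
  | nil => simp
  | cons c cs ih =>
    simp only [List.foldl_cons, pvStep]
    by_cases h0 : c == '0' <;> simp [h0, ih]

-- once x=true and nmbrs=false, the leading '0'-run is dropped, the rest copied
theorem pvLoop_x (l : List Char) (out : List Char) :
    (l.foldl pvStep (true, false, out)).2.2 = out ++ l.dropWhile (· == '0') := by
  induction l generalizing out with
  | nil => simp
  | cons c cs ih =>
    simp only [List.foldl_cons, pvStep]
    by_cases h0 : c == '0'
    · have hc : c = '0' := by simpa using h0
      subst hc
      simp [ih]
    · simp [h0, pvLoop_copy]

-- before any 'x': copy chars, and on the first 'x' switch to the x-state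
theorem pvLoop_pre (l : List Char) (out : List Char) :
    (l.foldl pvStep (false, false, out)).2.2 =
      out ++ (match l.findIdx? (· == 'x') with
        | none => l
        | some i => l.take (i+1) ++ (l.drop (i+1)).dropWhile (· == '0')) := by
  induction l generalizing out with
  | nil => simp
  | cons c cs ih =>
    simp only [List.foldl_cons, pvStep]
    by_cases hx : c == 'x'
    · simp only [hx]
      simp only [List.findIdx?_cons, hx]
      simpa [List.append_assoc] using pvLoop_x cs (out ++ [c])
    · simp only [hx]
      simp only [List.findIdx?_cons, hx]
      cases h : cs.findIdx? (· == 'x') with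
      | none => simp [ih, h]
      | some i => simp [ih, h, List.append_assoc]

-- B, on the list level, computed via findIdx?
theorem pvFind_eq_findIdx? (l : List Char) :
    PySem.Chars.find l ['x'] =
      (match l.findIdx? (· == 'x') with
        | none => -1
        | some i => (i : Int)) := by
  cases h : l.findIdx? (· == 'x') with
  | none =>
    have hn : 'x' ∉ l := by
      intro hm
      have h' := List.findIdx?_eq_none_iff.mp h _ hm
      simp at h'
    have hni : ¬ ['x'] <:+: l := by
      intro hin
      exact hn (by
        rcases hin with ⟨p, s, hps⟩
        subst hps; simp)
    simpa using (PySem.Chars.find_eq_neg_one_iff (s := l) (sub := ['x'])).mpr hni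
  | some i =>
    rcases List.findIdx?_eq_some_iff_getElem.mp h with ⟨hi, hp, hall⟩
    have hget : l[i] = 'x' := by simpa using hp
    have hmin : ∀ j, j < i → l[j]? ≠ some 'x' := by
      intro j hj hje
      have hjl : j < l.length := Nat.lt_trans hj hi
      have := hall j hj
      rw [List.getElem?_eq_getElem hjl] at hje
      have hxj : l[j] = 'x' := by simpa using hje
      simp [hxj] at this
    -- find is nonneg: ['x'] is an infix
    have hinf : ['x'] <:+: l := by
      refine ⟨l.take i, l.drop (i+1), ?_⟩
      rw [show l.take i ++ ['x'] ++ l.drop (i+1) = l.take i ++ 'x' :: l.drop (i+1) by simp]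
      rw [← hget, ← List.drop_eq_getElem_cons hi]
      exact List.take_append_drop i l
    have hnn : 0 ≤ PySem.Chars.find l ['x'] :=
      (PySem.Chars.find_nonneg_iff (s := l) (sub := ['x'])).mpr hinf
    rcases PySem.Chars.find_spec (s := l) (sub := ['x']) hnn with ⟨hpre, hfirst⟩
    set k := (PySem.Chars.find l ['x']).toNat with hk
    rcases hpre with ⟨t, ht⟩
    have hkl : k < l.length := by
      have hd : l.drop k ≠ [] := by
        intro he; rw [he] at ht; simp at ht
      have := List.length_pos_iff.mpr hd
      simp only [List.length_drop] at this
      omega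
    have hkx : l[k] = 'x' := by
      have h0 : (l.drop k)[0]? = some 'x' := by rw [← ht]; simp
      rw [List.getElem?_drop] at h0
      simpa [List.getElem?_eq_getElem hkl] using h0
    -- i ≤ k by minimality of findIdx?, k ≤ i by minimality of find
    have hik : i = k := by
      by_contra hne
      rcases Nat.lt_or_ge i k with hlt | hge
      · -- find would have found i earlier
        have : ['x'] <+: l.drop i := by
          have : l.drop i = 'x' :: l.drop (i+1) := by
            rw [← hget]; exact (List.drop_eq_getElem_cons hi)
          rw [this]; simp
        exact hfirst i hlt this
      · have hki : k < i := by omega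
        exact hmin k hki (by simp [List.getElem?_eq_getElem hkl, hkx])
    have : PySem.Chars.find l ['x'] = (k : Int) := by
      omega
    rw [this, hik]

theorem pvAlt_eq (s : String) :
    deleteLeadingZeroes_alt s = String.ofList
      (match s.toList.findIdx? (· == 'x') with
        | none => s.toList
        | some i => s.toList.take (i+1) ++ (s.toList.drop (i+1)).dropWhile (· == '0')) := by
  unfold deleteLeadingZeroes_alt
  simp only [PySem.Str.find_eq, show ("x".toList) = ['x'] from rfl]
  rw [pvFind_eq_findIdx?]
  cases h : s.toList.findIdx? (· == 'x') with
  | none => simp [String.ofList_toList]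
  | some i =>
    have hne : (((i : Int)) == -1) = false := by
      rw [beq_eq_false_iff_ne]; omega
    simp only [hne, Bool.false_eq_true, if_false]
    congr 1
    rw [show ((i : Int) + 1) = ((i + 1 : Nat) : Int) by push_cast; ring]
    rw [PySem.List.slice_to_natCast, PySem.List.slice_from_natCast]

-- ===== VERDICT (by name: the statement is the Claim_ definition above) =====
theorem deleteLeadingZeroes_spec : Claim_equal_deleteLeadingZeroes := by
  intro s _
  unfold Spec_deleteLeadingZeroes
  rw [pvAlt_eq]
  show String.ofList (s.toList.foldl pvStep (false, false, [])).2.2 = _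
  rw [pvLoop_pre]
  cases h : s.toList.findIdx? (· == 'x') with
  | none => simp
  | some i => simp
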